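-- pv_equiv track=rewrite | github.com/ramchandra3101/Agent_SQL | src/nodes/visualizer.py | _choose_chart
-- ===== SOURCE A (Python) =====
-- def _choose_chart(kinds: dict[str, str]) -> tuple[str, list[str]]:
--     """Return ``(chart_kind, columns_used)``."""
--     temporal = [c for c, k in kinds.items() if k == "temporal"]
--     numeric = [c for c, k in kinds.items() if k == "numeric"]
--     categorical = [c for c, k in kinds.items() if k == "categorical"]
--
--     if temporal and numeric:
--         return "line", [temporal[0], numeric[0]]
--     if categorical and numeric:
--         return "bar", [categorical[0], numeric[0]]
--     if len(numeric) >= 2: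
--         return "scatter", [numeric[0], numeric[1]]
--     if len(numeric) == 1:
--         return "histogram", [numeric[0]]
--     return "none", []
-- ===== SOURCE B (Python) =====
-- _RULES = (
--     ("line", ("temporal", "numeric")),
--     ("bar", ("categorical", "numeric")),
--     ("scatter", ("numeric", "numeric")),
--     ("histogram", ("numeric",)),
-- )
--
--
-- def _match_pattern(kinds, pattern):
--     """Bind, left to right, each required kind in ``pattern`` to the next
--     not-yet-used column of that kind (searched in insertion order).
--     Return the bound columns, or None if some requirement cannot be met."""
--     used = {}
--     cols = []
--     for want in pattern:
--         idx = used.get(want, 0)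
--         col = None
--         seen = 0
--         for c, k in kinds.items():
--             if k == want:
--                 if seen == idx:
--                     col = c
--                     break
--                 seen += 1
--         if col is None:
--             return None
--         used[want] = idx + 1
--         cols.append(col)
--     return cols
--
--
-- def _choose_chart(kinds: dict[str, str]) -> tuple[str, list[str]]:
--     """Return ``(chart_kind, columns_used)`` by trying a declarative rule
--     table: the first chart whose required-kind pattern can be bound wins."""
--     for chart, pattern in _RULES:
--         cols = _match_pattern(kinds, pattern)
--         if cols is not None:
--             return chart, cols
--     return "none", []
-- ===== Notes on version B (the rewrite author's own statement) =====
-- stated objective: alternative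
-- what changed: Replaces the comprehensions-plus-branch-chain with a declarative rule table (chart name -> required kind pattern) and a generic matcher that binds each required kind to the next unused column of that kind, returning the first rule that matches.
import Mathlib
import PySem

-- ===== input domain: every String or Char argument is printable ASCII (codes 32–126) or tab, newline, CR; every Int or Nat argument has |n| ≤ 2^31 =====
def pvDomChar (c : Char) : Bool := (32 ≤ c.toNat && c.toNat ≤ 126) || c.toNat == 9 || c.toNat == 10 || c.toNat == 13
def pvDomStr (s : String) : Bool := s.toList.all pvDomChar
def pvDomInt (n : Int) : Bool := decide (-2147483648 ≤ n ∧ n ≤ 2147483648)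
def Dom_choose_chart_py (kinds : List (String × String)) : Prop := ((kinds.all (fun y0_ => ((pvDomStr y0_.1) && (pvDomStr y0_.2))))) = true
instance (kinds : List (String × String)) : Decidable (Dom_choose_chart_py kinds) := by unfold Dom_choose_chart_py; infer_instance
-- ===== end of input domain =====

-- B replaces A's comprehensions-plus-branch-chain with a declarative rule table and a generic pattern matcher; same cost, different decomposition.


-- ===== PORT A =====
def choose_chart_py (kinds : List (String × String)) : String × List String :=
  let temporal := (kinds.filter (fun p => p.2 == "temporal")).map (·.1)
  let numeric := (kinds.filter (fun p => p.2 == "numeric")).map (·.1)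
  let categorical := (kinds.filter (fun p => p.2 == "categorical")).map (·.1)
  if !temporal.isEmpty && !numeric.isEmpty then
    ("line", [temporal.head!, numeric.head!])
  else if !categorical.isEmpty && !numeric.isEmpty then
    ("bar", [categorical.head!, numeric.head!])
  else if numeric.length ≥ 2 then
    ("scatter", [numeric.head!, numeric[1]!])
  else if numeric.length = 1 then
    ("histogram", [numeric.head!])
  else
    ("none", [])

-- ===== PORT B =====
-- inner 'for c, k in kinds.items()' loop of _match_pattern: find the column of
-- kind `want` at occurrence index `idx`, having already skipped `seen` occurrences
def findNth (kinds : List (String × String)) (want : String) (idx : Nat) (seen : Nat) : Option String :=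
  match kinds with
  | [] => none
  | p :: t =>
    if p.2 == want then
      (if seen == idx then some p.1 else findNth t want idx (seen + 1))
    else findNth t want idx seen

-- the 'for want in pattern' loop of _match_pattern, with state (used, cols)
def matchGo (kinds : List (String × String)) : List String → PySem.Dict String Nat → List String → Option (List String)
  | [], _, cols => some cols
  | want :: rest, used, cols =>
    let idx := used.getD want 0
    match findNth kinds want idx 0 with
    | none => none
    | some col => matchGo kinds rest (used.insert want (idx + 1)) (cols ++ [col])

def matchPattern (kinds : List (String × String)) (pattern : List String) : Option (List String) :=
  matchGo kinds pattern PySem.Dict.empty []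

-- the 'for chart, pattern in _RULES' loop of _choose_chart
def tryRules (kinds : List (String × String)) : List (String × List String) → String × List String
  | [] => ("none", [])
  | (chart, pattern) :: rest =>
    match matchPattern kinds pattern with
    | some cols => (chart, cols)
    | none => tryRules kinds rest

def choose_chart_py_alt (kinds : List (String × String)) : String × List String :=
  tryRules kinds [("line", ["temporal", "numeric"]), ("bar", ["categorical", "numeric"]),
                  ("scatter", ["numeric", "numeric"]), ("histogram", ["numeric"])]

-- ===== PRECONDITION & SPEC =====
def Spec_choose_chart_py (kinds : List (String × String)) (out : String × List String) : Prop := out = choose_chart_py_alt kinds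
instance (kinds : List (String × String)) (out : String × List String) : Decidable (Spec_choose_chart_py kinds out) := by unfold Spec_choose_chart_py; infer_instance

-- ===== CLAIM (what is proved, stated in full; the proofs are below) =====
def Claim_equal_choose_chart_py : Prop := ∀ (kinds : List (String × String)), Dom_choose_chart_py kinds → Spec_choose_chart_py kinds (choose_chart_py kinds)

-- ===== LEMMAS AND PROOFS =====

theorem findNth_eq (kinds : List (String × String)) (want : String) (idx seen : Nat) (h : seen ≤ idx) :
    findNth kinds want idx seen = ((kinds.filter (fun p => p.2 == want)).map Prod.fst)[idx - seen]? := by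
  induction kinds generalizing seen with
  | nil => simp [findNth]
  | cons p t ih =>
    by_cases hw : p.2 = want
    · by_cases he : seen = idx
      · subst he; simp [findNth, hw]
      · have hlt : seen < idx := lt_of_le_of_ne h he
        have : findNth (p :: t) want idx seen = findNth t want idx (seen + 1) := by
          simp [findNth, hw, he]
        rw [this, ih (seen + 1) hlt]
        have : idx - seen = (idx - (seen + 1)) + 1 := by omega
        simp [hw, this]
    · have : findNth (p :: t) want idx seen = findNth t want idx seen := by
        simp [findNth, hw]
      rw [this, ih seen h]
      simp [hw]

theorem findNth_zero (kinds : List (String × String)) (want : String) (idx : Nat) :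
    findNth kinds want idx 0 = ((kinds.filter (fun p => p.2 == want)).map Prod.fst)[idx]? :=
  findNth_eq kinds want idx 0 (Nat.zero_le _)

theorem match_pair (kinds : List (String × String)) (k1 k2 : String) (h : k1 ≠ k2) :
    matchPattern kinds [k1, k2] =
      match ((kinds.filter (fun p => p.2 == k1)).map Prod.fst)[0]?,
            ((kinds.filter (fun p => p.2 == k2)).map Prod.fst)[0]? with
      | some a, some b => some [a, b]
      | _, _ => none := by
  unfold matchPattern
  simp only [matchGo, findNth_zero, PySem.Dict.getD_insert, if_neg (Ne.symm h)]
  cases h1 : ((kinds.filter (fun p => p.2 == k1)).map Prod.fst)[0]? <;>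
    cases h2 : ((kinds.filter (fun p => p.2 == k2)).map Prod.fst)[0]? <;>
      (simp only [List.getElem?_map] at h1 h2; simp [h1, h2])

theorem match_scatter (kinds : List (String × String)) :
    matchPattern kinds ["numeric", "numeric"] =
      match ((kinds.filter (fun p => p.2 == "numeric")).map Prod.fst)[0]?,
            ((kinds.filter (fun p => p.2 == "numeric")).map Prod.fst)[1]? with
      | some a, some b => some [a, b]
      | _, _ => none := by
  unfold matchPattern
  simp only [matchGo, findNth_zero, PySem.Dict.getD_insert_self]
  cases h1 : ((kinds.filter (fun p => p.2 == "numeric")).map Prod.fst)[0]? <;>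
    cases h2 : ((kinds.filter (fun p => p.2 == "numeric")).map Prod.fst)[1]? <;>
      (simp only [List.getElem?_map] at h1 h2; simp [h1, h2])

theorem match_single (kinds : List (String × String)) (k1 : String) :
    matchPattern kinds [k1] =
      match ((kinds.filter (fun p => p.2 == k1)).map Prod.fst)[0]? with
      | some a => some [a]
      | none => none := by
  unfold matchPattern
  simp only [matchGo, findNth_zero]
  cases h1 : ((kinds.filter (fun p => p.2 == k1)).map Prod.fst)[0]? <;> (simp only [List.getElem?_map] at h1; simp [h1])

-- ===== VERDICT (by name: the statement is the Claim_ definition above) =====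
theorem choose_chart_py_spec : Claim_equal_choose_chart_py := by
  unfold Claim_equal_choose_chart_py
  intro kinds _
  unfold Spec_choose_chart_py choose_chart_py choose_chart_py_alt
  simp only [tryRules]
  rw [match_pair _ _ _ (by decide), match_pair _ _ _ (by decide), match_scatter, match_single]
  set T := (kinds.filter (fun p => p.2 == "temporal")).map Prod.fst with hT
  set N := (kinds.filter (fun p => p.2 == "numeric")).map Prod.fst with hN
  set C := (kinds.filter (fun p => p.2 == "categorical")).map Prod.fst with hC
  clear hT hN hC
  cases T with
  | nil =>
    cases C with
    | nil =>
      cases N with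
      | nil => simp
      | cons x xs =>
        cases xs with
        | nil => simp [List.head!]
        | cons y ys => simp [List.head!]
    | cons c cs =>
      cases N with
      | nil => simp
      | cons x xs => simp [List.head!]
  | cons t ts =>
    cases N with
    | nil =>
      cases C with
      | nil => simp
      | cons c cs => simp
    | cons x xs => simp [List.head!]
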